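-- pv_equiv track=rewrite | github.com/zeshengli98/Leetcode | HackRank/expedia-07.py | getEfficiency
-- ===== SOURCE A (Python) =====
-- def getEfficiency(li):
--     s = sum(li)
--     # this is base condition.
--     if s % 2:
--         return -1
--     ele = s // 2
--     hash_map = {}
--     for i in li:
--         if hash_map.get(i):
--             hash_map[i] += 1
--         else:
--             hash_map[i] = 1
--     ans = 0
--     for i, j in hash_map.items():
--         key1 = i
--         key2 = ele - i
--         if hash_map.get(key2):
--             if j == hash_map[key2]:
--                 ans = ans + j * (key1 * key2)
--             else:
--                 return -1
--         else:
--             return -1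
--     # return the ans.
--     return ans // 2
-- ===== SOURCE B (Python) =====
-- def getEfficiency(li):
--     s = sum(li)
--     if s % 2:
--         return -1
--     ele = s // 2
--     srt = sorted(li)
--     rev = srt[::-1]
--     if any(a + b != ele for a, b in zip(srt, rev)):
--         return -1
--     return sum(a * b for a, b in zip(srt, rev)) // 2
-- ===== Notes on version B (the rewrite author's own statement) =====
-- stated objective: simpler
-- what changed: Replaces A's frequency-dict build plus per-distinct-value complement-count lookups by sorting the list and checking/multiplying each element against its mirror in the reversed sorted list (zip with reverse), with no dictionary at all.
import Mathlib
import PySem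

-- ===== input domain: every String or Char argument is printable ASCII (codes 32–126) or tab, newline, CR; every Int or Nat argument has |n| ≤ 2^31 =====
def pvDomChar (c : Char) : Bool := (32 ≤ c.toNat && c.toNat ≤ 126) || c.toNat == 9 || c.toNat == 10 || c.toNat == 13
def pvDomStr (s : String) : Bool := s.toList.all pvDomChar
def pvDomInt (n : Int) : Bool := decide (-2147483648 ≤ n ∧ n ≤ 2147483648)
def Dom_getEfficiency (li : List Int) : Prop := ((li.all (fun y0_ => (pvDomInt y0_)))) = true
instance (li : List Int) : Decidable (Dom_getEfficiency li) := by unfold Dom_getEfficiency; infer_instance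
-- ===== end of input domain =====

-- B replaces A's frequency-dict complement checks by sort + zip-with-reverse: simpler, no dict.

-- ===== PORT A =====
-- the 'for i in li' counting loop with A's get-truthiness branches
def pvBuildA (li : List Int) : PySem.Dict Int Int :=
  li.foldl (fun d i =>
    match d.get? i with
    | some v => if v ≠ 0 then d.insert i (v + 1) else d.insert i 1
    | none => d.insert i 1) PySem.Dict.empty

-- one step of the 'for i, j in hash_map.items()' loop; none = a 'return -1' was hit
def pvStepA (hm : PySem.Dict Int Int) (ele : Int) (acc : Option Int) (p : Int × Int) : Option Int :=
  match acc with
  | none => none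
  | some ans =>
    match hm.get? (ele - p.1) with
    | some w => if w ≠ 0 then (if p.2 = w then some (ans + p.2 * (p.1 * (ele - p.1))) else none) else none
    | none => none

def getEfficiency (li : List Int) : Int :=
  let s := li.sum
  if PySem.Int.mod s 2 ≠ 0 then -1
  else
    let ele := PySem.Int.floordiv s 2
    let hm := pvBuildA li
    match hm.items.foldl (pvStepA hm ele) (some 0) with
    | some ans => PySem.Int.floordiv ans 2
    | none => -1

-- ===== PORT B =====
-- srt[::-1] is List.reverse (exact: a reversed copy)
def getEfficiency_alt (li : List Int) : Int :=
  let s := li.sum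
  if PySem.Int.mod s 2 ≠ 0 then -1
  else
    let ele := PySem.Int.floordiv s 2
    let srt := PySem.List.sorted li (fun x => x) false
    let rev := srt.reverse
    if (srt.zip rev).any (fun p => decide (p.1 + p.2 ≠ ele)) then -1
    else PySem.Int.floordiv ((srt.zip rev).map (fun p => p.1 * p.2)).sum 2

-- ===== PRECONDITION & SPEC =====
def Spec_getEfficiency (li : List Int) (out : Int) : Prop := out = getEfficiency_alt li
instance (li : List Int) (out : Int) : Decidable (Spec_getEfficiency li out) := by unfold Spec_getEfficiency; infer_instance

-- ===== CLAIM (what is proved, stated in full; the proofs are below) =====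
def Claim_equal_getEfficiency : Prop := ∀ (li : List Int), Dom_getEfficiency li → Spec_getEfficiency li (getEfficiency li)

-- ===== LEMMAS AND PROOFS =====

-- A's counting loop is the canonical counter
theorem pvBuildA_eq_counter (li : List Int) : pvBuildA li = PySem.Dict.counter li := by
  rw [pvBuildA, ← PySem.Dict.foldl_insert_getD_add_one_eq_counter]
  apply PySem.List.foldl_congr_mem
  intro d i _
  rw [PySem.Dict.getD_eq_get?_getD]
  cases h : d.get? i with
  | none => simp
  | some v => by_cases hv : v = 0 <;> simp [hv]

theorem pvCounter_get? (li : List Int) (v : Int) :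
    (PySem.Dict.counter li).get? v = if v ∈ li then some ((li.count v : Int)) else none := by
  have hc := PySem.Dict.contains_counter li v
  have hg := PySem.Dict.getD_counter li v
  rw [PySem.Dict.getD_eq_get?_getD] at hg
  rw [PySem.Dict.contains_eq_isSome_get?] at hc
  by_cases hm : v ∈ li
  · simp only [hm, if_true]
    cases h : (PySem.Dict.counter li).get? v with
    | none => rw [h] at hc; simp [hm] at hc
    | some w => rw [h] at hg; simp at hg; rw [hg]
  · simp only [hm, if_false]
    cases h : (PySem.Dict.counter li).get? v with
    | none => rfl
    | some w => rw [h] at hc; simp [hm] at hc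

-- the symmetry property both programs test, in counting form
def pvSym (li : List Int) (ele : Int) : Prop := ∀ v : Int, li.count (ele - v) = li.count v

-- the per-item test A performs, as a Prop
def pvOk (hm : PySem.Dict Int Int) (ele : Int) (p : Int × Int) : Prop :=
  match hm.get? (ele - p.1) with
  | some w => w ≠ 0 ∧ p.2 = w
  | none => False

-- items loop, all items pass: the fold returns the accumulated sum
theorem pvFoldA_eq (hm : PySem.Dict Int Int) (ele : Int) (ps : List (Int × Int)) (a : Int)
    (hok : ∀ p ∈ ps, pvOk hm ele p) :
    ps.foldl (pvStepA hm ele) (some a) = some (a + (ps.map (fun p => p.2 * (p.1 * (ele - p.1)))).sum) := by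
  induction ps generalizing a with
  | nil => simp
  | cons p t ih =>
    have hp := hok p (by simp)
    unfold pvOk at hp
    cases h : hm.get? (ele - p.1) with
    | none => rw [h] at hp; exact absurd hp (by simp)
    | some w =>
      rw [h] at hp
      obtain ⟨hw, he⟩ := hp
      simp only [List.foldl_cons, pvStepA, h, if_pos hw, if_pos he]
      rw [ih _ (fun q hq => hok q (by simp [hq]))]
      simp; ring

-- none is absorbing for the items fold
theorem pvFoldA_absorb (hm : PySem.Dict Int Int) (ele : Int) (ps : List (Int × Int)) :
    ps.foldl (pvStepA hm ele) none = none := by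
  induction ps with
  | nil => rfl
  | cons p t ih => simpa [pvStepA] using ih

-- items loop, some item fails: the fold is a 'return -1'
theorem pvFoldA_none (hm : PySem.Dict Int Int) (ele : Int) (ps : List (Int × Int))
    (hbad : ∃ p ∈ ps, ¬ pvOk hm ele p) (acc : Option Int) :
    ps.foldl (pvStepA hm ele) acc = none := by
  induction ps generalizing acc with
  | nil => exact absurd hbad (by simp)
  | cons p t ih =>
    by_cases hp : pvOk hm ele p
    · have ht : ∃ q ∈ t, ¬ pvOk hm ele q := by
        obtain ⟨q, hq, hnq⟩ := hbad
        rcases List.mem_cons.mp hq with rfl | hqt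
        · exact absurd hp hnq
        · exact ⟨q, hqt, hnq⟩
      exact ih ht _
    · have hstep : pvStepA hm ele acc p = none := by
        cases acc with
        | none => rfl
        | some a =>
          unfold pvOk at hp
          cases h : hm.get? (ele - p.1) with
          | none => simp [pvStepA, h]
          | some w =>
            rw [h] at hp
            by_cases hw : w = 0
            · simp [pvStepA, h, hw]
            · have hne : p.2 ≠ w := fun he => hp ⟨hw, he⟩
              simp [pvStepA, h, hw, hne]
      rw [List.foldl_cons, hstep]
      exact pvFoldA_absorb hm ele t

-- symmetry in count form ↔ the per-member check A performs
theorem pvSym_iff_members (li : List Int) (ele : Int) :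
    pvSym li ele ↔ ∀ v ∈ li, (ele - v) ∈ li ∧ li.count (ele - v) = li.count v := by
  constructor
  · intro h v hv
    refine ⟨?_, h v⟩
    have : 0 < li.count (ele - v) := by
      rw [h v]; exact List.count_pos_iff.mpr hv
    exact List.count_pos_iff.mp this
  · intro h v
    by_cases hv : v ∈ li
    · exact (h v hv).2
    · have h0 : li.count v = 0 := List.count_eq_zero.mpr hv
      rw [h0]
      by_cases hev : (ele - v) ∈ li
      · have h2 := (h (ele - v) hev).2
        have hsimp : ele - (ele - v) = v := by ring
        rw [hsimp, h0] at h2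
        omega
      · exact List.count_eq_zero.mpr hev

-- the complement map is an involution, hence injective
theorem pvCompl_inj (ele : Int) : Function.Injective (fun x : Int => ele - x) := by
  intro a b h; simpa using h

-- symmetry ↔ the reversed sorted list is the complement map of the sorted list
theorem pvSym_iff_rev (li : List Int) (ele : Int) :
    pvSym li ele ↔ (PySem.List.sorted li (fun x => x) false).reverse
      = (PySem.List.sorted li (fun x => x) false).map (fun x => ele - x) := by
  set srt := PySem.List.sorted li (fun x => x) false with hsrt
  have hperm : srt.Perm li := PySem.List.sorted_perm li (fun x => x) false
  have hpair : List.Pairwise (fun a b : Int => a ≤ b) srt := PySem.List.sorted_pairwise li (fun x => x)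
  constructor
  · intro hsym
    have hpermm : (srt.map (fun x => ele - x)).Perm li := by
      refine List.Perm.trans ?_ hperm
      rw [List.perm_iff_count]
      intro a
      have h1 : List.count a (srt.map (fun x => ele - x)) = List.count (ele - a) srt := by
        have := List.count_map_of_injective srt (fun x => ele - x) (pvCompl_inj ele) (ele - a)
        simpa using this
      rw [h1, hperm.count_eq, hsym a, ← hperm.count_eq]
    have hrevperm : (srt.map (fun x => ele - x)).reverse.Perm srt := by
      refine List.Perm.trans (List.reverse_perm _) (hpermm.trans hperm.symm)
    have hrevpair : List.Pairwise (fun a b : Int => a ≤ b) (srt.map (fun x => ele - x)).reverse := by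
      rw [List.pairwise_reverse, List.pairwise_map]
      exact hpair.imp (by intro a b h; omega)
    have heq : (srt.map (fun x => ele - x)).reverse = srt :=
      List.Perm.eq_of_pairwise (fun a b _ _ h1 h2 => le_antisymm h1 h2) hrevpair hpair hrevperm
    have hre := congrArg List.reverse heq
    rw [List.reverse_reverse] at hre
    exact hre.symm
  · intro hrev v
    have h1 : List.count v li = List.count v srt.reverse := by
      rw [List.count_reverse, hperm.count_eq]
    rw [hrev] at h1
    have h2 : List.count v (srt.map (fun x => ele - x)) = List.count (ele - v) srt := by
      have := List.count_map_of_injective srt (fun x => ele - x) (pvCompl_inj ele) (ele - v)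
      simpa using this
    rw [h2, hperm.count_eq] at h1
    omega

-- B's zip-with-reverse test, characterized
theorem pvAny_false_iff (srt : List Int) (ele : Int) :
    ((srt.zip srt.reverse).any (fun p => decide (p.1 + p.2 ≠ ele)) = false)
      ↔ srt.reverse = srt.map (fun x => ele - x) := by
  rw [List.any_eq_false]
  constructor
  · intro h
    apply List.ext_getElem (by simp)
    intro i h1 h2
    have h1' : i < srt.length := by simpa using h1
    have hlen : i < (srt.zip srt.reverse).length := by simp [List.length_zip]; omega
    have hmem : (srt[i]'(by simpa using h1), srt.reverse[i]'h1) ∈ srt.zip srt.reverse := by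
      have := List.getElem_zip (l := srt) (l' := srt.reverse) (i := i) (h := hlen)
      rw [← this]; exact List.getElem_mem _
    have := h _ hmem
    simp at this ⊢
    omega
  · intro h p hp
    rw [h] at hp
    have hz : srt.zip (srt.map (fun x => ele - x)) = srt.map (fun x => (x, ele - x)) := by
      have := List.zip_map' (f := fun x : Int => x) (g := fun x : Int => ele - x) (l := srt)
      simpa using this
    rw [hz, List.mem_map] at hp
    obtain ⟨x, _, rfl⟩ := hp
    simp

-- sum over the counter's items = elementwise sum
theorem pvDedup_sum (li : List Int) (g : Int → Int) :
    ((PySem.Set.ofList li).map (fun k => (li.count k : Int) * g k)).sum = (li.map g).sum := by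
  have h1 : (li.map g).sum = (Multiset.map g (li : Multiset Int)).sum := by
    rw [Multiset.map_coe, Multiset.sum_coe]
  rw [h1, Finset.sum_multiset_map_count]
  have h2 : (li : Multiset Int).toFinset = (PySem.Set.ofList li).toFinset := by
    ext a
    simp [PySem.Set.mem_ofList]
  rw [h2, List.sum_toFinset _ (PySem.Set.nodup_ofList li)]
  apply congrArg List.sum
  apply List.map_congr_left
  intro k _
  rw [Multiset.coe_count, nsmul_eq_mul]

-- ===== VERDICT (by name: the statement is the Claim_ definition above) =====
theorem getEfficiency_spec : Claim_equal_getEfficiency := by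
  intro li _
  unfold Spec_getEfficiency
  simp only [getEfficiency, getEfficiency_alt]
  by_cases hpar : PySem.Int.mod li.sum 2 ≠ 0
  · rw [if_pos hpar, if_pos hpar]
  · rw [if_neg hpar, if_neg hpar]
    set ele := PySem.Int.floordiv li.sum 2 with hele
    set srt := PySem.List.sorted li (fun x => x) false with hsrt
    have hperm : srt.Perm li := PySem.List.sorted_perm li (fun x => x) false
    have hitems := PySem.Dict.items_counter li
    rw [pvBuildA_eq_counter]
    by_cases hsym : pvSym li ele
    · -- both accept: equal sums
      have hok : ∀ p ∈ (PySem.Dict.counter li).items, pvOk (PySem.Dict.counter li) ele p := by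
        intro p hp
        rw [hitems, List.mem_map] at hp
        obtain ⟨k, hk, rfl⟩ := hp
        rw [PySem.Set.mem_ofList] at hk
        have hmem := (pvSym_iff_members li ele).mp hsym k hk
        unfold pvOk
        rw [pvCounter_get?]
        simp only [hmem.1, if_true]
        constructor
        · have hpos : 0 < li.count (ele - k) := hmem.2 ▸ List.count_pos_iff.mpr hk
          simp only [ne_eq, Int.natCast_eq_zero]
          omega
        · simp [hmem.2]
      rw [pvFoldA_eq _ _ _ _ hok]
      have hrev : srt.reverse = srt.map (fun x => ele - x) := (pvSym_iff_rev li ele).mp hsym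
      have hany : ((srt.zip srt.reverse).any (fun p => decide (p.1 + p.2 ≠ ele)) = false) :=
        (pvAny_false_iff srt ele).mpr hrev
      rw [hany, if_neg (by simp)]
      have hA : ((PySem.Dict.counter li).items.map (fun p => p.2 * (p.1 * (ele - p.1)))).sum
          = (li.map (fun x => x * (ele - x))).sum := by
        rw [hitems, List.map_map]
        have := pvDedup_sum li (fun k => k * (ele - k))
        simpa [Function.comp] using this
      have hz : srt.zip (srt.map (fun x => ele - x)) = srt.map (fun x => (x, ele - x)) := by
        simpa using List.zip_map' (f := fun x : Int => x) (g := fun x : Int => ele - x) (l := srt)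
      have hB : ((srt.zip srt.reverse).map (fun p => p.1 * p.2)).sum
          = (li.map (fun x => x * (ele - x))).sum := by
        rw [hrev, hz, List.map_map]
        have := (hperm.map (fun x : Int => x * (ele - x))).sum_eq
        simpa [Function.comp] using this
      rw [zero_add, hA, ← hB]
    · -- both reject with -1
      have hbad : ∃ p ∈ (PySem.Dict.counter li).items, ¬ pvOk (PySem.Dict.counter li) ele p := by
        rw [pvSym_iff_members] at hsym
        push Not at hsym
        obtain ⟨v, hv, hnv⟩ := hsym
        refine ⟨(v, (li.count v : Int)), ?_, ?_⟩
        · rw [hitems, List.mem_map]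
          exact ⟨v, (PySem.Set.mem_ofList li v).mpr hv, rfl⟩
        · unfold pvOk
          rw [pvCounter_get?]
          by_cases hev : (ele - v) ∈ li
          · simp only [hev, if_true]
            intro hcon
            have : li.count v = li.count (ele - v) := by exact_mod_cast hcon.2
            exact hnv hev this.symm
          · simp [hev]
      rw [pvFoldA_none _ _ _ hbad]
      have hany : (srt.zip srt.reverse).any (fun p => decide (p.1 + p.2 ≠ ele)) = true := by
        cases hb : (srt.zip srt.reverse).any (fun p => decide (p.1 + p.2 ≠ ele)) with
        | true => rfl
        | false =>
          exact absurd ((pvSym_iff_rev li ele).mpr ((pvAny_false_iff srt ele).mp hb)) hsym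
      rw [hany, if_pos rfl]
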